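-- pv_equiv track=rewrite | github.com/paiml/depyler | examples/hard_pathological_mixed2.py | format_bytes_as_hex
-- ===== SOURCE A (Python) =====
-- def int_to_base_str(n: int, radix: int) -> str:
--     """Convert integer to string in given base (2-16)."""
--     if n == 0:
--         return "0"
--     digits: str = "0123456789abcdef"
--     is_neg: bool = n < 0
--     val: int = n
--     if is_neg == True:
--         val = 0 - n
--     result: str = ""
--     while val > 0:
--         remainder: int = val % radix
--         result = digits[remainder] + result
--         val = val // radix
--     if is_neg == True:
--         return "-" + result
--     return result
--
-- def pad_left_zeros(s: str, width: int) -> str: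
--     """Pad string with leading zeros to width."""
--     result: str = s
--     while len(result) < width:
--         result = "0" + result
--     return result
--
-- def format_byte_as_hex(val: int) -> str:
--     """Format a byte (0-255) as two hex digits."""
--     hex_str: str = int_to_base_str(val, 16)
--     return pad_left_zeros(hex_str, 2)
--
-- def format_bytes_as_hex(vals: list[int]) -> str:
--     """Format list of bytes as hex string with separators."""
--     result: str = ""
--     i: int = 0
--     while i < len(vals):
--         if i > 0:
--             result = result + ":"
--         result = result + format_byte_as_hex(vals[i])
--         i = i + 1
--     return result
-- ===== SOURCE B (Python) =====
-- def format_bytes_as_hex(vals: list[int]) -> str: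
--     """Format list of bytes as hex string with separators."""
--     return ":".join("%02x" % v for v in vals)
-- ===== Notes on version B (the rewrite author's own statement) =====
-- stated objective: idiomatic
-- what changed: Replaced the manual digit-by-digit base-conversion loop, zero-padding loop and index-driven repeated string concatenation with a single str.join over Python's '%02x' hex format spec.
import Mathlib
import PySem

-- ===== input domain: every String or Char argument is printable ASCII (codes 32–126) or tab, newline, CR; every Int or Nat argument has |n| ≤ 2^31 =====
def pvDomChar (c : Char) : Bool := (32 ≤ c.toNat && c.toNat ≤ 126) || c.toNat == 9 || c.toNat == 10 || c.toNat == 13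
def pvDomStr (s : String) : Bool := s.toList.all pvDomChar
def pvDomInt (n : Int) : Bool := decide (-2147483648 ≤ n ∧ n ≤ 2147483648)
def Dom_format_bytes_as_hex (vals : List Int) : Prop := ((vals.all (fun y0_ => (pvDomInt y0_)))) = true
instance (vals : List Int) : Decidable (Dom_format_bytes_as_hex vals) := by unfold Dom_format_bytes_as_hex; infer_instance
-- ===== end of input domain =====

-- B replaces A's manual base-conversion loop, zero-padding loop and index-driven
-- concatenation loop by one idiomatic join over Python's "%02x" format spec.

-- ===== PORT A =====

def pvDigits : String := "0123456789abcdef"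

-- while val > 0: result = digits[val % radix] + result; val = val // radix
-- (fuel = val.toNat is enough iterations for any radix ≥ 2; A only calls radix = 16;
--  digits[remainder] cannot raise since 0 ≤ remainder < 16, so the `.elim ""` default is unreachable)
def i2bLoop : Nat → Int → Int → String → String
  | 0, _, _, result => result
  | fuel+1, radix, val, result =>
    if val > 0 then
      i2bLoop fuel radix (PySem.Int.floordiv val radix)
        (((PySem.Str.pyGet? pvDigits (PySem.Int.mod val radix)).elim "" String.singleton) ++ result)
    else result

def int_to_base_str (n radix : Int) : String :=
  if n == 0 then "0"
  else
    let isNeg : Bool := n < 0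
    let val : Int := if isNeg then 0 - n else n
    let result : String := i2bLoop val.toNat radix val ""
    if isNeg then "-" ++ result else result

-- while len(result) < width: result = "0" + result
-- (each pass lengthens result by one, so fuel = (width - len(s)).toNat is exactly enough)
def padLoop : Nat → String → Int → String
  | 0, result, _ => result
  | fuel+1, result, width =>
    if PySem.Str.len result < width then padLoop fuel ("0" ++ result) width else result

def pad_left_zeros (s : String) (width : Int) : String :=
  padLoop (width - PySem.Str.len s).toNat s width

def format_byte_as_hex (val : Int) : String := pad_left_zeros (int_to_base_str val 16) 2

-- while i < len(vals): if i > 0: result += ":"; result += format_byte_as_hex(vals[i]); i += 1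
-- (i advances by one per pass, so fuel = len(vals) is exactly enough from i = 0;
--  vals[i] cannot raise under the loop guard, so the `.elim ""` default is unreachable)
def fbahLoop : Nat → List Int → String → Int → String
  | 0, _, result, _ => result
  | fuel+1, vals, result, i =>
    if i < (vals.length : Int) then
      fbahLoop fuel vals ((if i > 0 then result ++ ":" else result) ++
        ((PySem.List.pyGet? vals i).elim "" format_byte_as_hex)) (i+1)
    else result

def format_bytes_as_hex (vals : List Int) : String := fbahLoop vals.length vals "" 0

-- ===== PORT B =====

-- hand port of Python's "%x" on a nonnegative value (exact: lowercase hex digits,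
-- most significant first, "0" for 0; fuel = n is enough since n/16 < n for n > 0)
def hexCore : Nat → Nat → List Char
  | 0, _ => []
  | fuel+1, n => if n < 16 then [Nat.digitChar n] else hexCore fuel (n / 16) ++ [Nat.digitChar (n % 16)]

def hexChars (n : Nat) : List Char := hexCore (n+1) n

-- "%02x" % v : '-' sign for negatives, then the zero-pad of the format spec,
-- which coincides with str.zfill to width 2 (zeros go between sign and digits)
def fmt02x (v : Int) : String :=
  PySem.Str.zfill
    (if v < 0 then String.ofList ('-' :: hexChars (-v).toNat) else String.ofList (hexChars v.toNat)) 2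

def format_bytes_as_hex_alt (vals : List Int) : String :=
  PySem.Str.join ":" (vals.map fmt02x)

-- ===== PRECONDITION & SPEC =====
def Spec_format_bytes_as_hex (vals : List Int) (out : String) : Prop := out = format_bytes_as_hex_alt vals
instance (vals : List Int) (out : String) : Decidable (Spec_format_bytes_as_hex vals out) := by unfold Spec_format_bytes_as_hex; infer_instance

-- ===== CLAIM (what is proved, stated in full; the proofs are below) =====
def Claim_equal_format_bytes_as_hex : Prop := ∀ (vals : List Int), Dom_format_bytes_as_hex vals → Spec_format_bytes_as_hex vals (format_bytes_as_hex vals)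

-- ===== LEMMAS AND PROOFS =====

theorem i2bLoop_zero (fuel : Nat) (radix : Int) (acc : String) :
    i2bLoop fuel radix 0 acc = acc := by
  cases fuel <;> simp [i2bLoop]

theorem digit_lookup : ∀ n : Nat, n < 16 →
    (PySem.Str.pyGet? pvDigits ((n : Nat) : Int)).elim "" String.singleton
      = String.ofList [Nat.digitChar n] := by decide

theorem modcast (n : Nat) : PySem.Int.mod (n : Int) 16 = ((n % 16 : Nat) : Int) := by
  rw [PySem.Int.mod_eq_emod_of_pos (by norm_num)]; push_cast; rfl

theorem divcast (n : Nat) : PySem.Int.floordiv (n : Int) 16 = ((n / 16 : Nat) : Int) := by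
  rw [PySem.Int.floordiv_eq_ediv_of_pos (by norm_num)]; push_cast; rfl

theorem hexCore_fuel : ∀ n fuel : Nat, n < fuel → hexCore fuel n = hexChars n := by
  intro n
  induction n using Nat.strong_induction_on with
  | _ n ih =>
    intro fuel h
    obtain ⟨f, rfl⟩ : ∃ f, fuel = f + 1 := ⟨fuel - 1, by omega⟩
    by_cases h16 : n < 16
    · rw [hexChars, hexCore, hexCore, if_pos h16, if_pos h16]
    · rw [hexChars, hexCore, hexCore, if_neg h16, if_neg h16,
        ih (n/16) (by omega) f (by omega), ih (n/16) (by omega) n (by omega)]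

theorem i2bLoop_eq_hexChars : ∀ n : Nat, 0 < n → ∀ fuel, n ≤ fuel → ∀ acc,
    i2bLoop fuel 16 (n : Int) acc = String.ofList (hexChars n) ++ acc := by
  intro n
  induction n using Nat.strong_induction_on with
  | _ n ih =>
    intro hn fuel hfuel acc
    obtain ⟨f, rfl⟩ : ∃ f, fuel = f + 1 := ⟨fuel - 1, by omega⟩
    rw [i2bLoop, if_pos (by exact_mod_cast hn), modcast, divcast,
      digit_lookup _ (Nat.mod_lt _ (by norm_num))]
    by_cases h16 : n < 16
    · rw [Nat.div_eq_of_lt h16, Nat.cast_zero, i2bLoop_zero, hexChars,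
        hexCore, if_pos h16, Nat.mod_eq_of_lt h16]
    · rw [ih (n/16) (by omega) (by omega) f (by omega)]
      conv_rhs => rw [hexChars, hexCore, if_neg h16]
      rw [hexCore_fuel (n/16) n (by omega)]
      rw [String.ofList_append, String.append_assoc]

theorem hexChars_length_pos (n : Nat) : 1 ≤ (hexChars n).length := by
  by_cases h : n < 16
  · rw [hexChars, hexCore, if_pos h]; simp
  · rw [hexChars, hexCore, if_neg h]; simp

theorem hexChars_of_lt (n : Nat) (h : n < 16) : hexChars n = [Nat.digitChar n] := by
  rw [hexChars, hexCore, if_pos h]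

theorem hexChars_length_ge_two (n : Nat) (h : 16 ≤ n) : 2 ≤ (hexChars n).length := by
  rw [hexChars, hexCore, if_neg (by omega), hexCore_fuel (n/16) n (by omega)]
  have := hexChars_length_pos (n/16)
  simp; omega

theorem toList_ofList' (l : List Char) : (String.ofList l).toList = l := by simp

theorem pad2_of_ge (s : String) (h : 2 ≤ s.toList.length) : pad_left_zeros s 2 = s := by
  unfold pad_left_zeros
  rw [PySem.Str.len_eq]
  have : ((2 : Int) - (s.toList.length : Int)).toNat = 0 := by omega
  rw [this, padLoop]

theorem pad2_of_one (s : String) (h : s.toList.length = 1) : pad_left_zeros s 2 = "0" ++ s := by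
  unfold pad_left_zeros
  rw [PySem.Str.len_eq, h]
  norm_num
  rw [padLoop, if_pos (by rw [PySem.Str.len_eq, h]; norm_num), padLoop]

theorem zfill2_of_ge (s : String) (h : 2 ≤ s.toList.length) : PySem.Str.zfill s 2 = s := by
  apply String.ext
  rw [PySem.Str.toList_zfill, PySem.Chars.zfill.eq_def, if_pos (by exact_mod_cast h)]

theorem zfill2_digit (c : Char) (hc : ¬(c = '+' ∨ c = '-')) :
    PySem.Str.zfill (String.ofList [c]) 2 = String.ofList ['0', c] := by
  apply String.ext
  rw [PySem.Str.toList_zfill, toList_ofList', PySem.Chars.zfill.eq_def]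
  simp [hc]

theorem digitChar_not_sign : ∀ n : Nat, n < 16 → ¬(Nat.digitChar n = '+' ∨ Nat.digitChar n = '-') := by decide

theorem i2b_pos (n : Nat) (hn : 0 < n) :
    int_to_base_str (n : Int) 16 = String.ofList (hexChars n) := by
  have h1 : ((n : Int) == 0) = false := by simp; omega
  have h2 : decide ((n : Int) < 0) = false := by simp
  simp only [int_to_base_str, h1, h2, Bool.false_eq_true, if_false,
    Int.toNat_natCast]
  rw [i2bLoop_eq_hexChars n hn n le_rfl "", String.append_empty]

theorem elem_eq (v : Int) : format_byte_as_hex v = fmt02x v := by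
  rcases lt_trichotomy v 0 with hv | rfl | hv
  · -- v < 0
    obtain ⟨n, hn, rfl⟩ : ∃ n : Nat, 0 < n ∧ v = -(n : Int) :=
      ⟨(-v).toNat, by omega, by omega⟩
    have h1 : ((-(n : Int)) == 0) = false := by simp; omega
    have h2 : decide ((-(n : Int)) < 0) = true := by simp; omega
    have h3 : (0 - (-(n : Int))) = (n : Int) := by omega
    have h4 : (-(-(n : Int))).toNat = n := by omega
    unfold format_byte_as_hex int_to_base_str fmt02x
    simp only [h1, h2, h3, h4, Bool.false_eq_true, if_false, if_true,
      Int.toNat_natCast, if_pos hv]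
    rw [i2bLoop_eq_hexChars n hn n le_rfl "", String.append_empty]
    have hmk : "-" ++ String.ofList (hexChars n) = String.ofList ('-' :: hexChars n) := by
      apply String.ext; simp
    rw [hmk, pad2_of_ge _ (by rw [toList_ofList']; have := hexChars_length_pos n; simp; omega),
      zfill2_of_ge _ (by rw [toList_ofList']; have := hexChars_length_pos n; simp; omega)]
  · decide
  · -- 0 < v
    obtain ⟨n, hn, rfl⟩ : ∃ n : Nat, 0 < n ∧ v = (n : Int) := ⟨v.toNat, by omega, by omega⟩
    unfold format_byte_as_hex fmt02x
    rw [i2b_pos n hn, if_neg (by omega), Int.toNat_natCast]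
    by_cases h16 : n < 16
    · rw [hexChars_of_lt _ h16, pad2_of_one _ (by rw [toList_ofList']; rfl),
        zfill2_digit _ (digitChar_not_sign _ h16)]
      apply String.ext; simp
    · rw [pad2_of_ge _ (by rw [toList_ofList']; exact hexChars_length_ge_two _ (by omega)),
        zfill2_of_ge _ (by rw [toList_ofList']; exact hexChars_length_ge_two _ (by omega))]

theorem pyGet?_in_range (vals : List Int) (i : Nat) (h : i < vals.length) :
    PySem.List.pyGet? vals (i : Int) = some vals[i] := by
  simp [PySem.List.pyGet?, PySem.List.pyIdx?, h]

theorem join_chars_aux : ∀ (l : List (List Char)) (x : List Char),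
    x ++ (l.map (fun s => ':' :: s)).flatten = PySem.Chars.join [':'] (x :: l) := by
  intro l
  induction l with
  | nil => intro x; simp [PySem.Chars.join_singleton]
  | cons y rest ih =>
    intro x
    rw [PySem.Chars.join_cons_cons, ← ih y]
    simp

theorem join_strings_aux (l : List String) (x : String) :
    x ++ String.join (l.map (fun s => ":" ++ s)) = PySem.Str.join ":" (x :: l) := by
  apply String.ext
  rw [String.toList_append, String.toList_join, PySem.Str.toList_join]
  have h1 : List.map String.toList (List.map (fun s => ":" ++ s) l)
      = List.map (fun s => ':' :: s) (List.map String.toList l) := by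
    simp [List.map_map]
  rw [h1, join_chars_aux]
  rfl

theorem join_cons' (a : String) (l : List String) : String.join (a :: l) = a ++ String.join l := by
  apply String.ext
  simp [String.toList_join]

theorem loop_tail : ∀ (k : Nat) (vals : List Int) (i : Nat) (acc : String),
    vals.length = i + k → 1 ≤ i →
    fbahLoop k vals acc (i : Int)
      = acc ++ String.join ((vals.drop i).map (fun v => ":" ++ format_byte_as_hex v)) := by
  intro k
  induction k with
  | zero =>
    intro vals i acc hlen _
    rw [fbahLoop, List.drop_eq_nil_of_le (by omega), List.map_nil,
      show String.join [] = "" from rfl, String.append_empty]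
  | succ k ih =>
    intro vals i acc hlen hi
    have hilt : i < vals.length := by omega
    rw [fbahLoop, if_pos (by exact_mod_cast hilt), if_pos (by exact_mod_cast hi),
      pyGet?_in_range vals i hilt]
    have : ((i : Int) + 1) = ((i + 1 : Nat) : Int) := by push_cast; ring
    rw [this, ih vals (i+1) _ (by omega) (by omega),
      List.drop_eq_getElem_cons hilt, List.map_cons, join_cons']
    simp [String.append_assoc]

theorem format_bytes_as_hex_eq (vals : List Int) :
    format_bytes_as_hex vals = format_bytes_as_hex_alt vals := by
  cases vals with
  | nil => rfl
  | cons v vs =>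
    unfold format_bytes_as_hex format_bytes_as_hex_alt
    have h0 : PySem.List.pyGet? (v :: vs) ((0 : Nat) : Int) = some v :=
      pyGet?_in_range (v :: vs) 0 (by simp)
    rw [show ((v :: vs).length) = vs.length + 1 from rfl, fbahLoop]
    rw [if_pos (show (0:Int) < ((v :: vs).length : Int) by simp)]
    rw [if_neg (show ¬ ((0:Int) > 0) by omega)]
    rw [show (0 : Int) = ((0 : Nat) : Int) from rfl, h0]
    rw [show ((0 : Nat) : Int) + 1 = ((1 : Nat) : Int) by norm_num,
      loop_tail vs.length (v :: vs) 1 _ (by simp [Nat.add_comm]) le_rfl]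
    simp only [Option.elim, String.empty_append, List.drop_one, List.tail_cons]
    simp only [elem_eq]
    have hj := join_strings_aux (vs.map fmt02x) (fmt02x v)
    simp only [List.map_map, Function.comp_def] at hj
    simpa using hj

-- ===== VERDICT (by name: the statement is the Claim_ definition above) =====
theorem format_bytes_as_hex_spec : Claim_equal_format_bytes_as_hex := by
  intro vals _
  unfold Spec_format_bytes_as_hex
  exact format_bytes_as_hex_eq vals
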